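-- pv_equiv track=rewrite | github.com/pwertenb/midi-classifier | midi.py | __create_answer_keys__
-- ===== SOURCE A (Python) =====
-- def __create_answer_keys__(draft, allow_dups=True):
--     chord_notes = dict()
--     tmp = []
--     for key, val in draft.items():
--         tup = tuple(val)
--         if allow_dups or (tup not in tmp):
--             tmp.append(tup)
--             chord_notes[key] = tup
--     answers = dict()
--     for key, val in draft.items():
--         tup = tuple(val)
--         if tup in answers:
--             answers[tup].append(key)
--         else:
--             answers[tup] = [key]
--
--     return chord_notes, answers
-- ===== SOURCE B (Python) =====
-- def __create_answer_keys__(draft, allow_dups=True):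
--     # Build the notes->keys index in one pass, then derive chord_notes from it.
--     answers = {}
--     for key, val in draft.items():
--         answers.setdefault(tuple(val), []).append(key)
--     if allow_dups:
--         chord_notes = {key: tuple(val) for key, val in draft.items()}
--     else:
--         # dict insertion order of `answers` is first-encounter order of each tuple,
--         # and keys[0] is the first key that mapped to it.
--         chord_notes = {keys[0]: tup for tup, keys in answers.items()}
--     return chord_notes, answers
-- ===== Notes on version B (the rewrite author's own statement) =====
-- stated objective: alternative
-- what changed: B builds the notes->keys index in one pass with setdefault and then derives chord_notes from that index (dict first-occurrence order gives the dedup order, keys[0] the first key), replacing A's separate O(n^2) list-scan dedup pass.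
import Mathlib
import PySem

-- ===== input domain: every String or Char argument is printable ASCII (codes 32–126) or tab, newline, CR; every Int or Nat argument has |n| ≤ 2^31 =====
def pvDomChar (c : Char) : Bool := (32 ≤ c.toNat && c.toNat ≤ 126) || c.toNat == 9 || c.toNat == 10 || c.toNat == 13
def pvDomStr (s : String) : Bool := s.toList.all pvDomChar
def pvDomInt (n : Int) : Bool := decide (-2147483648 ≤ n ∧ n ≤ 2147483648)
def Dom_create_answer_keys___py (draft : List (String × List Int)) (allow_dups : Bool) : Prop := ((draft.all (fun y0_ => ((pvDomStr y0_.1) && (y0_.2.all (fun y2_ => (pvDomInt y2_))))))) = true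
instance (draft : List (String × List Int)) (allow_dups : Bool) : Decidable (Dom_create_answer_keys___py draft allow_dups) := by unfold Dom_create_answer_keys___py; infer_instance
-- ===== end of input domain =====

-- B builds the notes->keys index once and derives chord_notes from it, instead of A's
-- separate O(n²) list-scan dedup pass (objective: alternative decomposition).

-- ===== PORT A =====
-- A's first loop: chord_notes with optional dedup by tuple (tmp = list of seen tuples)
def aPhase1 : List (String × List Int) → Bool → List (List Int) → PySem.Dict String (List Int) → PySem.Dict String (List Int)
  | [], _, _, chord_notes => chord_notes
  | (key, val) :: rest, allow_dups, tmp, chord_notes =>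
    if allow_dups || !(tmp.contains val) then
      aPhase1 rest allow_dups (tmp ++ [val]) (chord_notes.insert key val)
    else
      aPhase1 rest allow_dups tmp chord_notes

-- A's second loop: answers, grouping keys by tuple
def aPhase2 : List (String × List Int) → PySem.Dict (List Int) (List String) → PySem.Dict (List Int) (List String)
  | [], answers => answers
  | (key, val) :: rest, answers =>
    if answers.contains val then
      aPhase2 rest (answers.modify val [] (fun ks => ks ++ [key]))
    else
      aPhase2 rest (answers.insert val [key])

def create_answer_keys___py (draft : List (String × List Int)) (allow_dups : Bool) : (List (String × List Int)) × (List (List Int × List String)) :=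
  let items := (PySem.Dict.ofList draft).items   -- draft is a Python dict; draft.items()
  ((aPhase1 items allow_dups [] PySem.Dict.empty).items,
   (aPhase2 items PySem.Dict.empty).items)

-- ===== PORT B =====
-- answers = {}; for key, val in draft.items(): answers.setdefault(tuple(val), []).append(key)
def bGroup (items : List (String × List Int)) : PySem.Dict (List Int) (List String) :=
  items.foldl (fun answers kv => answers.insert kv.2 (answers.getD kv.2 [] ++ [kv.1])) PySem.Dict.empty

def create_answer_keys___py_alt (draft : List (String × List Int)) (allow_dups : Bool) : (List (String × List Int)) × (List (List Int × List String)) :=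
  let items := (PySem.Dict.ofList draft).items   -- draft is a Python dict; draft.items()
  let answers := bGroup items
  let chord_notes :=
    if allow_dups then
      -- {key: tuple(val) for key, val in draft.items()}
      items.foldl (fun d kv => d.insert kv.1 kv.2) PySem.Dict.empty
    else
      -- {keys[0]: tup for tup, keys in answers.items()}; every group is nonempty by
      -- construction, so headD is exact for keys[0]
      answers.items.foldl (fun d tk => d.insert (tk.2.headD "") tk.1) PySem.Dict.empty
  (chord_notes.items, answers.items)

-- ===== PRECONDITION & SPEC =====
def Spec_create_answer_keys___py (draft : List (String × List Int)) (allow_dups : Bool) (out : (List (String × List Int)) × (List (List Int × List String))) : Prop := out = create_answer_keys___py_alt draft allow_dups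
instance (draft : List (String × List Int)) (allow_dups : Bool) (out : (List (String × List Int)) × (List (List Int × List String))) : Decidable (Spec_create_answer_keys___py draft allow_dups out) := by unfold Spec_create_answer_keys___py; infer_instance

-- ===== CLAIM (what is proved, stated in full; the proofs are below) =====
def Claim_equal_create_answer_keys___py : Prop := ∀ (draft : List (String × List Int)) (allow_dups : Bool), Dom_create_answer_keys___py draft allow_dups → Spec_create_answer_keys___py draft allow_dups (create_answer_keys___py draft allow_dups)

-- ===== LEMMAS AND PROOFS =====

theorem modify_eq_insert {κ ν : Type} [BEq κ] (d : PySem.Dict κ ν) (k : κ) (dflt : ν) (f : ν → ν) :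
    d.modify k dflt f = d.insert k (f (d.getD k dflt)) := rfl

theorem aPhase2_eq (l : List (String × List Int)) :
    ∀ d, aPhase2 l d = l.foldl (fun answers kv => answers.insert kv.2 (answers.getD kv.2 [] ++ [kv.1])) d := by
  induction l with
  | nil => intro d; rfl
  | cons p r ih =>
    intro d
    obtain ⟨k, v⟩ := p
    by_cases hc : d.contains v
    · simp [aPhase2, hc, modify_eq_insert, ih]
    · simp only [Bool.not_eq_true] at hc
      simp [aPhase2, hc, PySem.Dict.getD_of_not_contains d [] hc, ih]

theorem aPhase1_true (l : List (String × List Int)) :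
    ∀ tmp cn, aPhase1 l true tmp cn = l.foldl (fun d kv => d.insert kv.1 kv.2) cn := by
  induction l with
  | nil => intro tmp cn; rfl
  | cons p r ih => intro tmp cn; obtain ⟨k, v⟩ := p; simp [aPhase1, ih]

-- proof-only pure version of A's dedup pass
def dedup : List (String × List Int) → List (List Int) → List (String × List Int)
  | [], _ => []
  | (k, v) :: r, tmp => if tmp.contains v then dedup r tmp else (k, v) :: dedup r (tmp ++ [v])

theorem aPhase1_false (l : List (String × List Int)) :
    ∀ tmp cn, aPhase1 l false tmp cn = (dedup l tmp).foldl (fun d kv => d.insert kv.1 kv.2) cn := by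
  induction l with
  | nil => intro tmp cn; rfl
  | cons p r ih =>
    intro tmp cn
    obtain ⟨k, v⟩ := p
    by_cases hc : v ∈ tmp
    · simp [aPhase1, dedup, hc, ih]
    · simp [aPhase1, dedup, hc, ih]

theorem dedup_sublist (l : List (String × List Int)) : ∀ tmp, List.Sublist (dedup l tmp) l := by
  induction l with
  | nil => intro tmp; simp [dedup]
  | cons p r ih =>
    intro tmp
    obtain ⟨k, v⟩ := p
    by_cases hc : v ∈ tmp
    · simpa [dedup, hc] using (ih tmp).trans (List.sublist_cons_self _ _)
    · simpa [dedup, hc] using (ih (tmp ++ [v])).cons₂ (k, v)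

def headKey (tk : List Int × List String) : String × List Int := (tk.2.headD "", tk.1)

theorem headD_append_of_ne_nil {α : Type} (xs ys : List α) (d : α) (h : xs ≠ []) :
    (xs ++ ys).headD d = xs.headD d := by
  cases xs with
  | nil => exact absurd rfl h
  | cons a t => rfl

-- core invariant: A's dedup output is B's chord_notes derivation, group by group
theorem main_inv (l : List (String × List Int)) :
    ∀ (ans : PySem.Dict (List Int) (List String)),
      ans.keys.Nodup →
      (∀ w ∈ ans.values, w ≠ []) →
      (∀ p ∈ l, ∀ w ∈ ans.values, p.1 ∉ w) →
      (l.map Prod.fst).Nodup →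
      ans.items.map headKey ++ dedup l ans.keys
        = (l.foldl (fun answers kv => answers.insert kv.2 (answers.getD kv.2 [] ++ [kv.1])) ans).items.map headKey := by
  induction l with
  | nil => intro ans _ _ _ _; simp [dedup]
  | cons p r ih =>
    intro ans hnd hne hfresh hkeys
    obtain ⟨k, v⟩ := p
    by_cases hc : ans.contains v
    · -- existing group: entry's head is unchanged, dedup drops the pair
      have hmem : v ∈ ans.keys := (PySem.Dict.contains_iff_mem_keys ans v).1 hc
      have htmp : ans.keys.contains v = true := by
        simpa using hmem
      have hmap : (ans.insert v (ans.getD v [] ++ [k])).items.map headKey = ans.items.map headKey := by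
        rw [PySem.Dict.items_insert_of_contains ans _ hc, List.map_map]
        refine List.map_congr_left ?_
        intro q hq
        by_cases hq1 : q.1 == v
        · have hq1' : q.1 = v := by simpa using hq1
          have hqmem : (v, q.2) ∈ ans.items := by
            have : q = (v, q.2) := by
              cases q; simp_all
            exact this ▸ hq
          have hgetD : ans.getD v [] = q.2 := PySem.Dict.getD_of_mem_items ans hqmem hnd []
          have hq2ne : q.2 ≠ [] := hne q.2 (by
            simp only [PySem.Dict.values]
            exact List.mem_map.2 ⟨q, hq, rfl⟩)
          simp only [Function.comp, hq1, if_pos, headKey, hgetD]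
          rw [headD_append_of_ne_nil _ _ _ hq2ne]
          simp [hq1']
        · simp [Function.comp, hq1, headKey]
      have hkeq : (ans.insert v (ans.getD v [] ++ [k])).keys = ans.keys :=
        PySem.Dict.keys_insert_of_contains ans _ hc
      have hstep := ih (ans.insert v (ans.getD v [] ++ [k]))
        (by rw [hkeq]; exact hnd)
        (by
          intro w hw
          rcases PySem.Dict.mem_values_insert ans _ _ _ hw with h | h
          · rcases h with rfl; simp
          · exact hne w h)
        (by
          intro q hq w hw
          have hq1ne : q.1 ≠ k := by
            have := hkeys
            simp only [List.map_cons, List.nodup_cons] at this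
            intro he
            exact this.1 (List.mem_map.2 ⟨q, hq, he⟩)
          rcases PySem.Dict.mem_values_insert ans _ _ _ hw with h | h
          · rcases h with rfl
            -- w = ans.getD v [] ++ [k]
            have hw0 : ans.getD v [] ∈ ans.values ∨ ans.getD v [] = [] := by
              cases hg : ans.get? v with
              | none => right; simp [PySem.Dict.getD_eq_get?_getD, hg]
              | some w0 =>
                left
                have : (v, w0) ∈ ans.items := PySem.Dict.mem_items_of_get?_eq_some ans hg
                have : w0 ∈ ans.values := by
                  simp only [PySem.Dict.values]
                  exact List.mem_map.2 ⟨(v, w0), this, rfl⟩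
                simpa [PySem.Dict.getD_eq_get?_getD, hg] using this
            simp only [List.mem_append, List.mem_singleton]
            rintro (hin | rfl)
            · rcases hw0 with h0 | h0
              · exact hfresh q (List.mem_cons_of_mem _ hq) _ h0 hin
              · simp [h0] at hin
            · exact hq1ne rfl
          · exact hfresh q (List.mem_cons_of_mem _ hq) w h)
        (by
          simp only [List.map_cons, List.nodup_cons] at hkeys
          exact hkeys.2)
      simp only [dedup, htmp, if_pos, List.foldl_cons]
      rw [← hmap, ← hkeq]
      exact hstep
    · -- new group: both sides append (k, v)
      have hmem : v ∉ ans.keys := fun h => by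
        simp only [Bool.not_eq_true] at hc
        exact absurd ((PySem.Dict.contains_iff_mem_keys ans v).2 h) (by simp [hc])
      have hcf : ans.contains v = false := by simpa using hc
      have htmp : ans.keys.contains v = false := by
        simpa using hmem
      have hgetD : ans.getD v [] = [] := PySem.Dict.getD_of_not_contains ans [] hcf
      have hitems : (ans.insert v (ans.getD v [] ++ [k])).items = ans.items ++ [(v, [k])] := by
        rw [PySem.Dict.items_insert_of_not_contains ans _ hcf, hgetD]; simp
      have hkeq : (ans.insert v (ans.getD v [] ++ [k])).keys = ans.keys ++ [v] := by
        simp only [PySem.Dict.keys, hitems]; simp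
      have hstep := ih (ans.insert v (ans.getD v [] ++ [k]))
        (by rw [hkeq]; exact hnd.append (List.nodup_singleton v) (List.disjoint_singleton.2 hmem))
        (by
          intro w hw
          rcases PySem.Dict.mem_values_insert ans _ _ _ hw with h | h
          · rcases h with rfl; simp [hgetD]
          · exact hne w h)
        (by
          intro q hq w hw
          have hq1ne : q.1 ≠ k := by
            simp only [List.map_cons, List.nodup_cons] at hkeys
            intro he
            exact hkeys.1 (List.mem_map.2 ⟨q, hq, he⟩)
          rcases PySem.Dict.mem_values_insert ans _ _ _ hw with h | h
          · rcases h with rfl; simp [hgetD, hq1ne]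
          · exact hfresh q (List.mem_cons_of_mem _ hq) w h)
        (by
          simp only [List.map_cons, List.nodup_cons] at hkeys
          exact hkeys.2)
      simp only [dedup, htmp, Bool.false_eq_true, if_false, List.foldl_cons]
      rw [← hkeq, ← hstep, hitems]
      simp [headKey]

theorem dedup_eq_bGroup (l : List (String × List Int)) (h : (l.map Prod.fst).Nodup) :
    dedup l [] = (bGroup l).items.map headKey := by
  have := main_inv l PySem.Dict.empty (by simp [PySem.Dict.empty]) (by simp [PySem.Dict.empty, PySem.Dict.values]) (by simp [PySem.Dict.empty, PySem.Dict.values]) h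
  simpa [bGroup, PySem.Dict.empty] using this

theorem chord_eq (l : List (String × List Int)) (h : (l.map Prod.fst).Nodup) :
    (aPhase1 l false [] PySem.Dict.empty).items
      = ((bGroup l).items.foldl (fun d tk => d.insert (tk.2.headD "") tk.1) PySem.Dict.empty).items := by
  have hded : (dedup l []).map Prod.fst |>.Nodup :=
    h.sublist ((dedup_sublist l []).map Prod.fst)
  have hA : (aPhase1 l false [] PySem.Dict.empty).items = dedup l [] := by
    rw [aPhase1_false]
    have := PySem.Dict.items_foldl_insert_fresh (dedup l []) Prod.fst Prod.snd (PySem.Dict.empty : PySem.Dict String (List Int)) (by intro a _; simp) hded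
    simpa using this
  have hmapfst : ((bGroup l).items.map headKey).map Prod.fst = (bGroup l).items.map (fun tk => tk.2.headD "") := by
    simp [headKey, Function.comp]
  have hBnd : ((bGroup l).items.map (fun tk => tk.2.headD "")).Nodup := by
    rw [← hmapfst, ← dedup_eq_bGroup l h]
    exact hded
  have hB : ((bGroup l).items.foldl (fun d tk => d.insert (tk.2.headD "") tk.1) PySem.Dict.empty).items
      = (bGroup l).items.map headKey := by
    have := PySem.Dict.items_foldl_insert_fresh (bGroup l).items (fun tk => tk.2.headD "") Prod.fst (PySem.Dict.empty : PySem.Dict String (List Int)) (by intro a _; simp) hBnd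
    rw [show headKey = fun (tk : List Int × List String) => (tk.2.headD "", tk.1) from rfl]
    simpa [List.headD_eq_head?_getD, PySem.Dict.empty] using this
  rw [hA, hB, dedup_eq_bGroup l h]

-- ===== VERDICT (by name: the statement is the Claim_ definition above) =====
theorem create_answer_keys___py_spec : Claim_equal_create_answer_keys___py := by
  intro draft allow_dups _
  unfold Spec_create_answer_keys___py
  unfold create_answer_keys___py create_answer_keys___py_alt
  simp only []
  have hnd : (((PySem.Dict.ofList draft).items).map Prod.fst).Nodup := by
    have := PySem.Dict.nodup_keys_ofList (κ := String) (ν := List Int) draft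
    simpa [PySem.Dict.keys] using this
  cases allow_dups with
  | true =>
    refine Prod.ext ?_ ?_
    · simp only [aPhase1_true, if_pos]
    · simp [aPhase2_eq, bGroup]
  | false =>
    refine Prod.ext ?_ ?_
    · simpa using chord_eq _ hnd
    · simp [aPhase2_eq, bGroup]
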